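-- pv_equiv track=rewrite | github.com/pedro-nishida/Logic-Programming | Conjuntos.py | sobrejetora
-- ===== SOURCE A (Python) =====
-- def par(i, j, rel, n):
--     return 1<<i*n + j & rel == 1<<i*n + j
--
-- def sobrejetora(rel , n):
--     aux = False
--
--     for i in range(n):
--         for j in range(n):
--             if par(j, i, rel, n):
--                 aux = True
--                 continue
--         if not aux:
--             return False
--         aux = False
--
--     return True
-- ===== SOURCE B (Python) =====
-- def sobrejetora(rel, n):
--     if n <= 0:
--         return True
--     full = (1 << n) - 1
--     covered = 0
--     shifted = rel
--     for _ in range(n):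
--         covered |= shifted & full
--         shifted >>= n
--     return covered == full
-- ===== Notes on version B (the rewrite author's own statement) =====
-- stated objective: faster
-- what changed: Instead of A's nested per-target scan that builds a fresh huge integer 1<<(j*n+i) for every pair and early-exits per target, B OR-folds the n n-bit chunks of rel into a single coverage bitmask and compares it to 2^n-1 once.
import Mathlib
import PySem

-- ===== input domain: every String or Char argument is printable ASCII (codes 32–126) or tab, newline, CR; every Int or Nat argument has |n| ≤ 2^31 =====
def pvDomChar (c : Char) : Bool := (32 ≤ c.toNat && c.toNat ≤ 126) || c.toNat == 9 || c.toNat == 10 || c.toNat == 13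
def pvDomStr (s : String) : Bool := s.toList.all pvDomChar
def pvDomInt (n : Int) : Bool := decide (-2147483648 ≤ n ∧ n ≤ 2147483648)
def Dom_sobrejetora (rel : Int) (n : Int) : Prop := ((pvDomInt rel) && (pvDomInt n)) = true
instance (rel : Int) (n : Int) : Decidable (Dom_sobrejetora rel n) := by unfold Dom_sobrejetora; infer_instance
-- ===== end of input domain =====

-- B replaces A's per-target nested bit-test scan by OR-folding the n n-bit chunks of rel
-- into one coverage bitmask compared against 2^n - 1 (objective: faster).

-- ===== PORT A =====
-- helper `par` of A; the shift amount i*n+j is ≥ 0 at every call A makes (i, j ∈ range(n)),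
-- so `.toNat` is exact there.
def pvParA (i : Int) (j : Int) (rel : Int) (n : Int) : Bool :=
  PySem.Int.band (1 <<< (i * n + j).toNat) rel == 1 <<< (i * n + j).toNat

-- inner `for j in range(n)` loop: `aux` starts False, is set True when par fires
def pvInner (rel : Int) (n : Int) (i : Int) : Bool :=
  (PySem.List.pyRange 0 n 1).foldl (fun aux j => if pvParA j i rel n then true else aux) false

-- outer `for i in range(n)` loop with the early `return False`
def pvOuter (rel : Int) (n : Int) : List Int → Bool
  | [] => true
  | i :: rest => if pvInner rel n i then pvOuter rel n rest else false

def sobrejetora (rel : Int) (n : Int) : Bool :=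
  pvOuter rel n (PySem.List.pyRange 0 n 1)

-- ===== PORT B =====
def sobrejetora_alt (rel : Int) (n : Int) : Bool :=
  if n ≤ 0 then true
  else
    let full : Int := ((1 <<< n.toNat : Nat) : Int) - 1
    let p := (PySem.List.pyRange 0 n 1).foldl
      (fun (p : Int × Int) _ => (PySem.Int.bor p.1 (PySem.Int.band p.2 full), p.2 >>> n.toNat))
      (0, rel)
    p.1 == full

-- ===== PRECONDITION & SPEC =====
def Spec_sobrejetora (rel : Int) (n : Int) (out : Bool) : Prop := out = sobrejetora_alt rel n
instance (rel : Int) (n : Int) (out : Bool) : Decidable (Spec_sobrejetora rel n out) := by unfold Spec_sobrejetora; infer_instance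

-- ===== CLAIM (what is proved, stated in full; the proofs are below) =====
def Claim_equal_sobrejetora : Prop := ∀ (rel : Int) (n : Int), Dom_sobrejetora rel n → Spec_sobrejetora rel n (sobrejetora rel n)

-- ===== LEMMAS AND PROOFS =====

theorem pv_mod2 (x : Nat) : x % 2 = (x.testBit 0).toNat := by
  rcases Nat.mod_two_eq_zero_or_one x with h | h <;> simp [Nat.testBit_zero, h]

theorem pv_div2_and (m c : Nat) : (m &&& c) / 2 = (m / 2) &&& (c / 2) := by
  apply Nat.eq_of_testBit_eq; intro i
  simp [Nat.testBit_div_two, Nat.testBit_and]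

theorem pv_div2_ldiff (m c : Nat) : (Nat.ldiff m c) / 2 = Nat.ldiff (m / 2) (c / 2) := by
  apply Nat.eq_of_testBit_eq; intro i
  simp [Nat.testBit_div_two, Nat.testBit_ldiff]

theorem pv_sub_and (m c : Nat) : m - (m &&& c) = Nat.ldiff m c := by
  induction m using Nat.strong_induction_on generalizing c with
  | _ m ih =>
    by_cases hm : m = 0
    · subst hm
      apply Nat.eq_of_testBit_eq
      intro i
      simp [Nat.testBit_ldiff]
    · have ih2 := ih (m / 2) (Nat.div_lt_self (Nat.pos_of_ne_zero hm) (by omega)) (c / 2)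
      have h1 := pv_div2_and m c
      have h2 := pv_div2_ldiff m c
      have hle : (m / 2) &&& (c / 2) ≤ m / 2 := Nat.and_le_left
      have e1 := pv_mod2 m
      have e2 := pv_mod2 c
      have e3 := pv_mod2 (m &&& c)
      have e4 := pv_mod2 (Nat.ldiff m c)
      rw [Nat.testBit_and] at e3
      rw [Nat.testBit_ldiff] at e4
      cases hb1 : m.testBit 0 <;> cases hb2 : c.testBit 0 <;>
        rw [hb1] at e1 e3 e4 <;> rw [hb2] at e2 e3 e4 <;>
        simp only [Bool.and_true, Bool.and_false, Bool.not_true,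
          Bool.not_false, Bool.toNat_true, Bool.toNat_false] at e1 e2 e3 e4 <;>
        omega

theorem pv_tb_natCast (a : Nat) (i : Nat) : ((a : Int)).testBit i = a.testBit i := rfl

theorem pv_tb_shiftRight (x : Int) (s i : Nat) : (x >>> s).testBit i = x.testBit (s + i) := by
  cases x with
  | ofNat m =>
    show (Int.ofNat (m >>> s)).testBit i = (Int.ofNat m).testBit (s + i)
    show (m >>> s).testBit i = m.testBit (s + i)
    exact Nat.testBit_shiftRight m
  | negSucc m =>
    show (Int.negSucc (m >>> s)).testBit i = (Int.negSucc m).testBit (s + i)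
    show (!(m >>> s).testBit i) = (!m.testBit (s + i))
    rw [Nat.testBit_shiftRight m]

theorem pv_negSucc_not_nonneg (m : Nat) : ¬ (0 : Int) ≤ Int.negSucc m :=
  Int.not_le.mpr (Int.negSucc_lt_zero m)

theorem pv_band_natCast_nonneg (x : Int) (F : Nat) : 0 ≤ PySem.Int.band x (F : Int) := by
  unfold PySem.Int.band
  split_ifs with h1 h2 h3 <;> first
    | positivity
    | exact absurd (Int.natCast_nonneg F) ‹¬ 0 ≤ ((F : Nat) : Int)›

theorem pv_band_negSucc_natCast (m F : Nat) :
    PySem.Int.band (Int.negSucc m) (F : Int) = ((F - (F &&& m) : Nat) : Int) := by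
  unfold PySem.Int.band
  rw [if_neg (pv_negSucc_not_nonneg m), if_pos (Int.natCast_nonneg F)]
  have h2 : (-(Int.negSucc m) - 1).toNat = m := by
    rw [Int.neg_negSucc]; simp
  rw [h2, Int.toNat_natCast]

theorem pv_tb_band_natCast (x : Int) (F : Nat) (i : Nat) :
    (PySem.Int.band x (F : Int)).testBit i = (x.testBit i && F.testBit i) := by
  cases x with
  | ofNat m =>
    show (PySem.Int.band ((m : Nat) : Int) (F : Int)).testBit i = _
    rw [PySem.Int.band_natCast, pv_tb_natCast, Nat.testBit_and]
    rfl
  | negSucc m =>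
    rw [pv_band_negSucc_natCast, pv_sub_and, pv_tb_natCast, Nat.testBit_ldiff]
    show (F.testBit i && !m.testBit i) = ((!m.testBit i) && F.testBit i)
    exact Bool.and_comm _ _

theorem pv_tb_bor_nonneg (a b : Int) (ha : 0 ≤ a) (hb : 0 ≤ b) (i : Nat) :
    (PySem.Int.bor a b).testBit i = (a.testBit i || b.testBit i) := by
  rw [PySem.Int.bor_of_nonneg ha hb]
  conv_rhs => rw [← Int.toNat_of_nonneg ha, ← Int.toNat_of_nonneg hb]
  show (a.toNat ||| b.toNat).testBit i
      = ((Int.ofNat a.toNat).testBit i || (Int.ofNat b.toNat).testBit i)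
  rw [Nat.testBit_or]
  rfl

theorem pv_bor_nonneg (a b : Int) (ha : 0 ≤ a) (hb : 0 ≤ b) : 0 ≤ PySem.Int.bor a b := by
  rw [PySem.Int.bor_of_nonneg ha hb]; positivity

theorem pv_eq_of_tb (a b : Int) (ha : 0 ≤ a) (hb : 0 ≤ b)
    (h : ∀ i, a.testBit i = b.testBit i) : a = b := by
  rw [← Int.toNat_of_nonneg ha, ← Int.toNat_of_nonneg hb]
  exact congrArg _ (Nat.eq_of_testBit_eq (fun i => by
    have h2 := h i
    rw [← Int.toNat_of_nonneg ha, ← Int.toNat_of_nonneg hb] at h2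
    exact h2))

-- A's bit test `1 << k & rel == 1 << k` is Int.testBit
theorem pv_test_eq (rel : Int) (k : Nat) :
    ((PySem.Int.band (1 <<< k) rel) == 1 <<< k) = rel.testBit k := by
  simp only [Nat.one_shiftLeft]
  have hp : 0 < 2 ^ k := Nat.two_pow_pos k
  cases rel with
  | ofNat m =>
    show (PySem.Int.band ((2 ^ k : Nat) : Int) ((m : Nat) : Int) == ((2 ^ k : Nat) : Int))
        = Nat.testBit m k
    rw [PySem.Int.band_natCast]
    rw [Bool.eq_iff_iff, beq_iff_eq, Int.natCast_inj]
    rw [Nat.and_comm, Nat.and_two_pow]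
    cases hb : m.testBit k <;> simp <;> omega
  | negSucc m =>
    show (PySem.Int.band ((2 ^ k : Nat) : Int) (Int.negSucc m) == ((2 ^ k : Nat) : Int))
        = (!Nat.testBit m k)
    rw [PySem.Int.band_comm, pv_band_negSucc_natCast]
    rw [Bool.eq_iff_iff, beq_iff_eq, Int.natCast_inj]
    rw [Nat.and_comm, Nat.and_two_pow]
    cases hb : m.testBit k <;> simp <;> omega

theorem pv_parA_eq (rel n : Int) (hn : 0 ≤ n) (l k : Nat) :
    pvParA ((l : Nat) : Int) ((k : Nat) : Int) rel n = rel.testBit (l * n.toNat + k) := by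
  obtain ⟨n', rfl⟩ := Int.eq_ofNat_of_zero_le hn
  have h : (((l : Nat) : Int) * ((n' : Nat) : Int) + ((k : Nat) : Int)).toNat = l * n' + k := by
    rw [← Int.natCast_mul, ← Int.natCast_add, Int.toNat_natCast]
  unfold pvParA
  rw [h, pv_test_eq, Int.toNat_natCast]

theorem pv_foldl_orif (p : Int → Bool) (l : List Int) (a : Bool) :
    l.foldl (fun aux j => if p j then true else aux) a = (a || l.any p) := by
  induction l generalizing a with
  | nil => simp
  | cons hd tl ih =>
    show List.foldl _ (if p hd = true then true else a) tl = _
    rw [ih]; cases h : p hd <;> simp [h]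

theorem pv_outer_eq (rel n : Int) (l : List Int) : pvOuter rel n l = l.all (pvInner rel n) := by
  induction l with
  | nil => rfl
  | cons hd tl ih => cases h : pvInner rel n hd <;> simp [pvOuter, h, ih]

theorem pv_range_eq (n : Int) :
    PySem.List.pyRange 0 n 1 = (List.range n.toNat).map (fun k : Nat => (k : Int)) := by
  rw [PySem.List.pyRange_one]; simp

-- iterate view of B's fold (its body ignores the loop variable)
theorem pv_foldl_const (f : Int × Int → Int × Int) (l : List Int) (a : Int × Int) :
    l.foldl (fun p _ => f p) a = f^[l.length] a := by
  induction l generalizing a with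
  | nil => rfl
  | cons hd tl ih => simp [List.foldl, ih, Function.iterate_succ_apply]

def pvIt (rel : Int) (full : Int) (n' : Nat) : Nat → Int × Int
  | 0 => (0, rel)
  | k + 1 =>
    let p := pvIt rel full n' k
    (PySem.Int.bor p.1 (PySem.Int.band p.2 full), p.2 >>> n')

theorem pv_it_eq (rel full : Int) (n' : Nat) (k : Nat) :
    (fun (p : Int × Int) => (PySem.Int.bor p.1 (PySem.Int.band p.2 full), p.2 >>> n'))^[k] (0, rel)
      = pvIt rel full n' k := by
  induction k with
  | zero => rfl
  | succ k ih => rw [Function.iterate_succ_apply', ih]; rfl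

theorem pv_it_snd (rel full : Int) (n' : Nat) (k : Nat) :
    (pvIt rel full n' k).2 = rel >>> (k * n') := by
  induction k with
  | zero => simp [pvIt]
  | succ k ih =>
    show (pvIt rel full n' k).2 >>> n' = _
    rw [ih, ← Int.shiftRight_add]
    ring_nf

-- loop invariant of B: bit i of the accumulator says target i is covered by some source j < k
theorem pv_it_inv (rel : Int) (n' : Nat) (k : Nat) :
    0 ≤ (pvIt rel ((2 ^ n' - 1 : Nat) : Int) n' k).1 ∧
    ∀ i : Nat, (pvIt rel ((2 ^ n' - 1 : Nat) : Int) n' k).1.testBit i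
      = decide (i < n' ∧ ∃ j, j < k ∧ rel.testBit (j * n' + i)) := by
  induction k with
  | zero =>
    refine ⟨le_refl 0, fun i => ?_⟩
    show (Int.ofNat 0).testBit i = _
    simp [Int.testBit]
  | succ k ih =>
    obtain ⟨hnn, htb⟩ := ih
    have hb0 : 0 ≤ PySem.Int.band (pvIt rel ((2 ^ n' - 1 : Nat) : Int) n' k).2 ((2 ^ n' - 1 : Nat) : Int) :=
      pv_band_natCast_nonneg _ _
    constructor
    · exact pv_bor_nonneg _ _ hnn hb0
    · intro i
      show (PySem.Int.bor _ (PySem.Int.band _ _)).testBit i = _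
      rw [pv_tb_bor_nonneg _ _ hnn hb0, pv_tb_band_natCast, htb, pv_it_snd, pv_tb_shiftRight,
        Nat.testBit_two_pow_sub_one]
      rw [Bool.eq_iff_iff]
      simp only [Bool.or_eq_true, Bool.and_eq_true, decide_eq_true_eq]
      constructor
      · rintro (⟨hi', j, hj, hp⟩ | ⟨hp, hi'⟩)
        · exact ⟨hi', j, by omega, hp⟩
        · exact ⟨hi', k, by omega, hp⟩
      · rintro ⟨hi', j, hj, hp⟩
        rcases Nat.lt_succ_iff_lt_or_eq.mp hj with h | rfl
        · exact Or.inl ⟨hi', j, h, hp⟩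
        · exact Or.inr ⟨hp, hi'⟩

theorem pv_A_iff (rel n : Int) (hn : 0 < n) :
    sobrejetora rel n = true ↔
      ∀ k, k < n.toNat → ∃ l, l < n.toNat ∧ rel.testBit (l * n.toNat + k) := by
  unfold sobrejetora
  rw [pv_outer_eq, List.all_eq_true]
  rw [pv_range_eq]
  constructor
  · intro h k hk
    have h2 := h ((k : Int)) (List.mem_map.mpr ⟨k, List.mem_range.mpr hk, rfl⟩)
    unfold pvInner at h2
    rw [pv_foldl_orif, Bool.false_or, pv_range_eq, List.any_eq_true] at h2
    obtain ⟨j, hj, hpar⟩ := h2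
    obtain ⟨l, hl, rfl⟩ := List.mem_map.mp hj
    rw [pv_parA_eq rel n (by omega) l k] at hpar
    exact ⟨l, List.mem_range.mp hl, hpar⟩
  · intro h i hi
    obtain ⟨k, hk, rfl⟩ := List.mem_map.mp hi
    unfold pvInner
    rw [pv_foldl_orif, Bool.false_or, pv_range_eq, List.any_eq_true]
    obtain ⟨l, hl, hp⟩ := h k (List.mem_range.mp hk)
    refine ⟨(l : Int), List.mem_map.mpr ⟨l, List.mem_range.mpr hl, rfl⟩, ?_⟩
    rw [pv_parA_eq rel n (by omega) l k]
    exact hp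

theorem pv_full_eq (n' : Nat) : (((1 <<< n' : Nat) : Int)) - 1 = ((2 ^ n' - 1 : Nat) : Int) := by
  simp only [Nat.one_shiftLeft]
  rw [Int.natCast_sub Nat.one_le_two_pow]
  norm_num

theorem pv_B_iff (rel n : Int) (hn : 0 < n) :
    sobrejetora_alt rel n = true ↔
      ∀ k, k < n.toNat → ∃ l, l < n.toNat ∧ rel.testBit (l * n.toNat + k) := by
  unfold sobrejetora_alt
  rw [if_neg (by omega)]
  dsimp only
  rw [pv_foldl_const
      (fun (p : Int × Int) => (PySem.Int.bor p.1 (PySem.Int.band p.2 (((1 <<< n.toNat : Nat) : Int) - 1)), p.2 >>> n.toNat))]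
  rw [PySem.List.length_pyRange_one]
  simp only [Int.sub_zero]
  rw [pv_full_eq, pv_it_eq]
  obtain ⟨hnn, htb⟩ := pv_it_inv rel n.toNat n.toNat
  rw [beq_iff_eq]
  constructor
  · intro h k hk
    have h2 := htb k
    rw [h, pv_tb_natCast, Nat.testBit_two_pow_sub_one] at h2
    exact ((decide_eq_decide.mp h2).mp hk).2
  · intro h
    apply pv_eq_of_tb _ _ hnn (Int.natCast_nonneg _)
    intro i
    rw [htb i, pv_tb_natCast, Nat.testBit_two_pow_sub_one]
    by_cases hi : i < n.toNat
    · simp only [hi, true_and, decide_true]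
      obtain ⟨l, hl, hp⟩ := h i hi
      simp only [decide_eq_true_eq]
      exact ⟨l, hl, hp⟩
    · simp [hi]

-- ===== VERDICT (by name: the statement is the Claim_ definition above) =====
theorem sobrejetora_spec : Claim_equal_sobrejetora := by
  intro rel n _
  show sobrejetora rel n = sobrejetora_alt rel n
  by_cases hn : n ≤ 0
  · have hA : sobrejetora rel n = true := by
      unfold sobrejetora
      rw [PySem.List.pyRange_one_eq_nil hn]
      rfl
    have hB : sobrejetora_alt rel n = true := by
      unfold sobrejetora_alt; simp [hn]
    rw [hA, hB]
  · have hn' : 0 < n := by omega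
    rw [Bool.eq_iff_iff, pv_A_iff rel n hn', pv_B_iff rel n hn']
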